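-- pv_equiv track=rewrite | github.com/giovannitarter/adventofcode | 2024/python/07/sol.py | try_operators
-- ===== SOURCE A (Python) =====
-- def try_operators(res, vals):
--
--     if len(vals) == 1:
--         return vals[0] == res
--
--     else:
--         return any(
--                 [
--                     try_operators(res, (vals[0] + vals[1], *vals[2:])),
--                     try_operators(res, (vals[0] * vals[1], *vals[2:]))
--                 ]
--                 )
-- ===== SOURCE B (Python) =====
-- def try_operators(res, vals):
--     # Backward search from the target: undo the last value by subtraction,
--     # and by division only when it divides exactly (massive pruning).
--     def back(target, rev):
--         v, rest = rev[0], rev[1:]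
--         if not rest:
--             return target == v
--         if back(target - v, rest):
--             return True
--         if v == 0:
--             return target == 0
--         return target % v == 0 and back(target // v, rest)
--     return back(res, list(vals)[::-1])
-- ===== Notes on version B (the rewrite author's own statement) =====
-- stated objective: faster
-- what changed: B searches backward from the target, undoing the last value by subtraction and by division only when it divides exactly, with short-circuiting, instead of A's forward enumeration of all 2^(n-1) operator chains.
import Mathlib
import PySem

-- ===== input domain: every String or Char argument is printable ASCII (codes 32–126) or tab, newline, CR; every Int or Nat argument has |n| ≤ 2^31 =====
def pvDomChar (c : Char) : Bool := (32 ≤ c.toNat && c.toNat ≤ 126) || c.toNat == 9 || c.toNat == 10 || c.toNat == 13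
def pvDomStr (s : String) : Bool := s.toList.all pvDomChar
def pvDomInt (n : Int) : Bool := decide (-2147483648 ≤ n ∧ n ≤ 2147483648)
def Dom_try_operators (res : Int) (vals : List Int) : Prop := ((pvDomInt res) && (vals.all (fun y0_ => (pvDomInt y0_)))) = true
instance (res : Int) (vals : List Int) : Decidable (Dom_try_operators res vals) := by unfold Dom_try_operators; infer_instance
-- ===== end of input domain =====

-- B changes the algorithm: backward pruning search from the target (subtract the
-- last value, or divide by it only when it divides exactly), short-circuiting,
-- instead of A's forward enumeration of every +/* chain.

-- ===== PORT A =====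
def try_operators (res : Int) (vals : List Int) : Bool :=
  match vals with
  | [] => false            -- Python raises IndexError here; excluded by Pre_
  | [v] => v == res
  | a :: b :: rest =>
      try_operators res ((a + b) :: rest) || try_operators res ((a * b) :: rest)
termination_by vals.length

-- ===== PORT B =====
-- back(target, rev): rev is the remaining values, last-of-original first
def backChk (target : Int) : List Int → Bool
  | [] => false            -- Python raises IndexError here; excluded by Pre_
  | [v] => target == v
  | v :: w :: rest =>
      backChk (target - v) (w :: rest) ||
      (if v == 0 then target == 0
       else PySem.Int.mod target v == 0 && backChk (PySem.Int.floordiv target v) (w :: rest))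

def try_operators_alt (res : Int) (vals : List Int) : Bool :=
  backChk res vals.reverse

-- ===== PRECONDITION & SPEC =====
-- Pre_ excludes only the empty list, on which the Python A raises IndexError.
def Pre_try_operators (res : Int) (vals : List Int) : Prop := vals ≠ []
instance (res : Int) (vals : List Int) : Decidable (Pre_try_operators res vals) := by unfold Pre_try_operators; infer_instance
def pvWitness_try_operators : Int × List Int := (6, [2, 3])

def Spec_try_operators (res : Int) (vals : List Int) (out : Bool) : Prop := out = try_operators_alt res vals
instance (res : Int) (vals : List Int) (out : Bool) : Decidable (Spec_try_operators res vals out) := by unfold Spec_try_operators; infer_instance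

-- ===== CLAIM =====
def Claim_equal_try_operators : Prop := ∀ (res : Int) (vals : List Int), Dom_try_operators res vals → Pre_try_operators res vals → Spec_try_operators res vals (try_operators res vals)

-- ===== LEMMAS AND PROOFS =====

-- The set (as a list) of values reachable by folding +/* left-to-right,
-- starting from x, over t.
def acc (x : Int) : List Int → List Int
  | [] => [x]
  | v :: t => acc (x + v) t ++ acc (x * v) t

theorem acc_ne_nil (x : Int) (t : List Int) : acc x t ≠ [] := by
  induction t generalizing x with
  | nil => simp [acc]
  | cons v t ih => simp [acc, ih]

theorem tryA_eq_mem (res x : Int) (t : List Int) :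
    try_operators res (x :: t) = decide (res ∈ acc x t) := by
  induction t generalizing x with
  | nil =>
      simp only [try_operators]
      rw [Bool.eq_iff_iff]; simp [acc]; exact eq_comm
  | cons v t ih =>
      simp [try_operators, acc, ih, List.mem_append]

theorem mem_acc_snoc (r x v : Int) (t : List Int) :
    r ∈ acc x (t ++ [v]) ↔ (r - v) ∈ acc x t ∨ ∃ y ∈ acc x t, y * v = r := by
  induction t generalizing x with
  | nil =>
      simp [acc]
      constructor
      · rintro (h | h)
        · left; omega
        · right; omega
      · rintro (h | h)
        · left; omega
        · right; omega
  | cons w t ih =>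
      simp only [acc, List.cons_append, List.mem_append, ih]
      constructor
      · rintro ((h | ⟨y, hy, hy2⟩) | (h | ⟨y, hy, hy2⟩))
        · exact Or.inl (Or.inl h)
        · exact Or.inr ⟨y, Or.inl hy, hy2⟩
        · exact Or.inl (Or.inr h)
        · exact Or.inr ⟨y, Or.inr hy, hy2⟩
      · rintro ((h | h) | ⟨y, (hy | hy), hy2⟩)
        · exact Or.inl (Or.inl h)
        · exact Or.inr (Or.inl h)
        · exact Or.inl (Or.inr ⟨y, hy, hy2⟩)
        · exact Or.inr (Or.inr ⟨y, hy, hy2⟩)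

theorem mul_branch (r v x : Int) (t : List Int) (hv : v ≠ 0) :
    (∃ y ∈ acc x t, y * v = r) ↔ (v ∣ r ∧ PySem.Int.floordiv r v ∈ acc x t) := by
  constructor
  · rintro ⟨y, hy, rfl⟩
    refine ⟨Dvd.intro_left y rfl, ?_⟩
    have hmod : PySem.Int.mod (y * v) v = 0 :=
      (PySem.Int.mod_eq_zero_iff_dvd _ _).2 (Dvd.intro_left y rfl)
    have := PySem.Int.floordiv_mul_add_mod (y * v) v
    rw [hmod] at this
    have hq : PySem.Int.floordiv (y * v) v = y := by
      have : PySem.Int.floordiv (y * v) v * v = y * v := by omega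
      exact mul_right_cancel₀ hv this
    rwa [hq]
  · rintro ⟨⟨c, rfl⟩, hmem⟩
    refine ⟨PySem.Int.floordiv (v * c) v, hmem, ?_⟩
    have hmod : PySem.Int.mod (v * c) v = 0 :=
      (PySem.Int.mod_eq_zero_iff_dvd _ _).2 ⟨c, rfl⟩
    have := PySem.Int.floordiv_mul_add_mod (v * c) v
    omega

theorem mul_branch_zero (r x : Int) (t : List Int) :
    (∃ y ∈ acc x t, y * 0 = r) ↔ r = 0 := by
  constructor
  · rintro ⟨y, _, rfl⟩; simp
  · rintro rfl
    obtain ⟨y, hy⟩ := List.exists_mem_of_ne_nil _ (acc_ne_nil x t)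
    exact ⟨y, hy, by simp⟩

theorem backChk_eq_mem (res x : Int) (t : List Int) :
    backChk res (t.reverse ++ [x]) = decide (res ∈ acc x t) := by
  induction t using List.reverseRecOn generalizing res with
  | nil =>
      simp only [List.reverse_nil, List.nil_append, backChk]
      rw [Bool.eq_iff_iff]; simp [acc]
  | append_singleton t v ih =>
      have hrev : (t ++ [v]).reverse ++ [x] = v :: (t.reverse ++ [x]) := by simp
      rw [hrev]
      obtain ⟨w, rest, hwr⟩ : ∃ w rest, t.reverse ++ [x] = w :: rest := by
        cases h : t.reverse ++ [x] with
        | nil => exact absurd h (by simp)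
        | cons w rest => exact ⟨w, rest, rfl⟩
      rw [hwr]
      show (backChk (res - v) (w :: rest) ||
        (if v == 0 then decide (res = 0)
         else PySem.Int.mod res v == 0 && backChk (PySem.Int.floordiv res v) (w :: rest)))
        = decide (res ∈ acc x (t ++ [v]))
      rw [← hwr, ih, ih]
      by_cases hv : v = 0
      · subst hv
        simp only [beq_self_eq_true, if_true]
        rw [show (decide (res ∈ acc x (t ++ [0])) : Bool) =
              (decide ((res - 0) ∈ acc x t) || decide (res = 0)) by
            rw [Bool.eq_iff_iff]
            simp only [mem_acc_snoc, mul_branch_zero, decide_eq_true_eq, Bool.or_eq_true,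
              sub_zero]]
      · have hbeq : (v == 0) = false := by simp [hv]
        rw [hbeq, if_neg (by simp)]
        rw [show (decide (res ∈ acc x (t ++ [v])) : Bool) =
              (decide ((res - v) ∈ acc x t) ||
                (decide (v ∣ res) && decide (PySem.Int.floordiv res v ∈ acc x t))) by
            rw [Bool.eq_iff_iff]; simp [mem_acc_snoc, mul_branch _ _ _ _ hv]]
        rw [Bool.eq_iff_iff]
        simp [PySem.Int.mod_eq_zero_iff_dvd]

-- ===== VERDICT =====
theorem try_operators_spec : Claim_equal_try_operators := by
  intro res vals _ hpre
  unfold Spec_try_operators try_operators_alt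
  cases vals with
  | nil => exact absurd rfl hpre
  | cons x t =>
      rw [tryA_eq_mem, show (x :: t).reverse = t.reverse ++ [x] by simp,
        backChk_eq_mem]
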